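-- pv_equiv track=rewrite | github.com/yonghwankim-dev/algorithm | CodingTest/PROM/PROM_HighScoreKit/p05-01-test.py | solution
-- ===== SOURCE A (Python) =====
-- def create_answer(answers, answer):
--     tester = []  # 수포자가 생성한 답 리스트
--     idx = 0
--
--     for _ in range(len(answers)):
--         tester.append(answer[idx])
--         idx += 1
--         if idx >= len(answer):
--             idx = 0
--
--     return tester
--
-- def check_answer(answers, tester):
--     idx = 0
--     count = 0
--     for _ in range(len(answers)):
--         if answers[idx] == tester[idx]:
--             count += 1
--         idx += 1
--     return count
--
-- def solution(answers):
--     answer = []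
--
--     tester_answer = [[1, 2, 3, 4, 5],
--                      [2, 1, 2, 3, 2, 4, 2, 5],
--                      [3, 3, 1, 1, 2, 2, 4, 4, 5, 5]]
--
--     tester = []
--     for idx in range(len(tester_answer)):
--         tester.append(create_answer(answers, tester_answer[idx]))
--
--     tester_count = []
--     for idx in range(len(tester)):
--         tester_count.append(check_answer(answers, tester[idx]))
--
--     maximum_val = max(tester_count)
--
--     for idx in range(len(tester_count)):
--         if tester_count[idx] == maximum_val:
--             answer.append(idx+1)
--
--     answer.sort()
--
--     return answer
-- ===== SOURCE B (Python) =====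
-- def solution(answers):
--     p1 = [1, 2, 3, 4, 5]
--     p2 = [2, 1, 2, 3, 2, 4, 2, 5]
--     p3 = [3, 3, 1, 1, 2, 2, 4, 4, 5, 5]
--     c1 = c2 = c3 = 0
--     for i, a in enumerate(answers):
--         if a == p1[i % 5]:
--             c1 += 1
--         if a == p2[i % 8]:
--             c2 += 1
--         if a == p3[i % 10]:
--             c3 += 1
--     m = max(c1, c2, c3)
--     return [n for n, c in ((1, c1), (2, c2), (3, c3)) if c == m]
-- ===== Notes on version B (the rewrite author's own statement) =====
-- stated objective: simpler
-- what changed: B drops the create_answer/check_answer pipeline that materializes one full-length tester answer list per pattern and then rescans it: it makes a single pass over the answers with modular indexing into the three fixed pattern lists, keeping three scalar counters, then emits the 1-based indices of the maximal counters in ascending order.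
import Mathlib
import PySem

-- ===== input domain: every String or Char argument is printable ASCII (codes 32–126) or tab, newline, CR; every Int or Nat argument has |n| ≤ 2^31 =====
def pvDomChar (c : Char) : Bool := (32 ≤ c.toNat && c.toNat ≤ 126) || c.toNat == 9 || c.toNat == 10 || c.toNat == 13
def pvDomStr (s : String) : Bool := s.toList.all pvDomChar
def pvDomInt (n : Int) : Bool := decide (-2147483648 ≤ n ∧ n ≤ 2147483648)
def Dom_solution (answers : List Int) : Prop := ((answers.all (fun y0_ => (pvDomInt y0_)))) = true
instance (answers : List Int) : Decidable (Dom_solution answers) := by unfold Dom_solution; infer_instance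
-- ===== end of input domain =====

-- B replaces A's materialize-tester-lists-then-count pipeline by a single pass over the answers
-- with modular pattern indexing and three scalar counters (objective: simpler).

-- ===== PORT A =====
def create_answer (answers answer : List Int) : List Int :=
  ((PySem.List.pyRange 0 (answers.length : Int) 1).foldl
    (fun (st : List Int × Int) _ =>
      (st.1 ++ [PySem.List.pyGetD answer st.2 0],
       if (answer.length : Int) ≤ st.2 + 1 then 0 else st.2 + 1))
    ([], 0)).1

def check_answer (answers tester : List Int) : Int :=
  ((PySem.List.pyRange 0 (answers.length : Int) 1).foldl
    (fun (st : Int × Int) _ =>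
      (st.1 + 1,
       if PySem.List.pyGetD answers st.1 0 = PySem.List.pyGetD tester st.1 0 then st.2 + 1 else st.2))
    ((0 : Int), (0 : Int))).2

def solution (answers : List Int) : List Int :=
  let tester_answer : List (List Int) :=
    [[1, 2, 3, 4, 5], [2, 1, 2, 3, 2, 4, 2, 5], [3, 3, 1, 1, 2, 2, 4, 4, 5, 5]]
  let tester := (PySem.List.pyRange 0 (tester_answer.length : Int) 1).foldl
    (fun acc idx => acc ++ [create_answer answers (PySem.List.pyGetD tester_answer idx [])]) []
  let tester_count := (PySem.List.pyRange 0 (tester.length : Int) 1).foldl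
    (fun acc idx => acc ++ [check_answer answers (PySem.List.pyGetD tester idx [])]) []
  let maximum_val := (PySem.List.max? tester_count (fun x => x)).getD 0
  let answer := (PySem.List.pyRange 0 (tester_count.length : Int) 1).foldl
    (fun acc idx => if PySem.List.pyGetD tester_count idx 0 = maximum_val then acc ++ [idx + 1] else acc) []
  PySem.List.sorted answer (fun x => x) false

-- ===== PORT B =====
def solution_alt (answers : List Int) : List Int :=
  let p1 : List Int := [1, 2, 3, 4, 5]
  let p2 : List Int := [2, 1, 2, 3, 2, 4, 2, 5]
  let p3 : List Int := [3, 3, 1, 1, 2, 2, 4, 4, 5, 5]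
  let c := (PySem.List.enumerate answers 0).foldl
    (fun (c : Int × Int × Int) ia =>
      (c.1 + (if ia.2 = PySem.List.pyGetD p1 (PySem.Int.mod ia.1 5) 0 then 1 else 0),
       c.2.1 + (if ia.2 = PySem.List.pyGetD p2 (PySem.Int.mod ia.1 8) 0 then 1 else 0),
       c.2.2 + (if ia.2 = PySem.List.pyGetD p3 (PySem.Int.mod ia.1 10) 0 then 1 else 0)))
    ((0 : Int), (0 : Int), (0 : Int))
  let m := max c.1 (max c.2.1 c.2.2)
  (([(1, c.1), (2, c.2.1), (3, c.2.2)] : List (Int × Int)).filter (fun nc => nc.2 == m)).map (fun nc => nc.1)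

-- ===== PRECONDITION & SPEC =====
def Spec_solution (answers : List Int) (out : List Int) : Prop := out = solution_alt answers
instance (answers : List Int) (out : List Int) : Decidable (Spec_solution answers out) := by unfold Spec_solution; infer_instance

-- ===== CLAIM (what is proved, stated in full; the proofs are below) =====
def Claim_equal_solution : Prop := ∀ (answers : List Int), Dom_solution answers → Spec_solution answers (solution answers)

-- ===== LEMMAS AND PROOFS =====

-- score of one fixed pattern p against answers: Σ_{j < |answers|} [answers[j] = p[j % |p|]]
def patScore (p answers : List Int) : Int :=
  ((List.range answers.length).map
    (fun j => if answers.getD j 0 = p.getD (j % p.length) 0 then (1 : Int) else 0)).sum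

theorem len3_cast {α : Type} (x y z : α) : ((([x, y, z] : List α).length : Nat) : Int) = (3 : Int) := rfl

theorem succ_mod (n L : Nat) (h : 0 < L) :
    (n + 1) % L = (if n % L + 1 = L then 0 else n % L + 1) := by
  have h1 : (n + 1) % L = (n % L + 1) % L := by rw [Nat.mod_add_mod]
  split_ifs with hk
  · rw [h1, hk, Nat.mod_self]
  · have : n % L < L := Nat.mod_lt _ h
    rw [h1, Nat.mod_eq_of_lt (by omega)]

theorem create_aux (p : List Int) (hp : 0 < p.length) (n : Nat) :
    (PySem.List.pyRange 0 (n : Int) 1).foldl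
      (fun (st : List Int × Int) _ =>
        (st.1 ++ [PySem.List.pyGetD p st.2 0],
         if (p.length : Int) ≤ st.2 + 1 then 0 else st.2 + 1))
      ([], 0)
    = ((List.range n).map (fun j => p.getD (j % p.length) 0), ((n % p.length : Nat) : Int)) := by
  induction n with
  | zero => simp [PySem.List.pyRange_one_eq_nil]
  | succ n ih =>
    have h : ((n + 1 : Nat) : Int) = (n : Int) + 1 := by push_cast; ring
    rw [h, PySem.List.pyRange_one_succ_right (by positivity), List.foldl_append, ih]
    have hmlt : n % p.length < p.length := Nat.mod_lt _ hp
    simp only [List.foldl_cons, List.foldl_nil, PySem.List.pyGetD_natCast, List.range_succ,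
      List.map_append, List.map_cons, List.map_nil, List.getD]
    congr 1
    split_ifs with hle
    · have hk : n % p.length + 1 = p.length := by omega
      rw [succ_mod n p.length hp, if_pos hk]
      simp
    · have hk : ¬ (n % p.length + 1 = p.length) := by omega
      rw [succ_mod n p.length hp, if_neg hk]
      push_cast; ring

theorem check_aux (answers t : List Int) (n : Nat) :
    (PySem.List.pyRange 0 (n : Int) 1).foldl
      (fun (st : Int × Int) _ =>
        (st.1 + 1,
         if PySem.List.pyGetD answers st.1 0 = PySem.List.pyGetD t st.1 0 then st.2 + 1 else st.2))
      ((0 : Int), (0 : Int))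
    = ((n : Int),
       ((List.range n).map (fun j => if answers.getD j 0 = t.getD j 0 then (1 : Int) else 0)).sum) := by
  induction n with
  | zero => simp [PySem.List.pyRange_one_eq_nil]
  | succ n ih =>
    have h : ((n + 1 : Nat) : Int) = (n : Int) + 1 := by push_cast; ring
    rw [h, PySem.List.pyRange_one_succ_right (by positivity), List.foldl_append, ih]
    simp [List.range_succ, PySem.List.pyGetD_natCast]
    split_ifs <;> omega

theorem count_pattern (p answers : List Int) (hp : 0 < p.length) :
    check_answer answers (create_answer answers p) = patScore p answers := by
  unfold check_answer create_answer patScore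
  rw [create_aux p hp]
  dsimp only
  rw [check_aux]
  dsimp only
  congr 1
  apply List.map_congr_left
  intro j hj
  have hjlt : j < answers.length := List.mem_range.mp hj
  have ht : (List.map (fun j => p.getD (j % p.length) 0) (List.range answers.length)).getD j 0
      = p.getD (j % p.length) 0 := by
    rw [List.getD_eq_getElem?_getD]
    simp [hjlt]
  rw [ht]

-- B's per-pattern sum over (index, value) pairs equals patScore
theorem countB (answers p : List Int) (d : Int) (hd : d = (p.length : Int)) :
    ((PySem.List.enumerate answers 0).map
      (fun ia => if ia.2 = PySem.List.pyGetD p (PySem.Int.mod ia.1 d) 0 then (1 : Int) else 0)).sum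
    = patScore p answers := by
  subst hd
  rw [PySem.List.enumerate_eq_map_pyRange (d := (0 : Int)), PySem.List.len_eq,
    PySem.List.pyRange_zero_nat, List.map_map, List.map_map]
  unfold patScore
  congr 1
  apply List.map_congr_left
  intro j hj
  dsimp only [Function.comp]
  have hmod : PySem.Int.mod ((j : Nat) : Int) ((p.length : Nat) : Int) = ((j % p.length : Nat) : Int) :=
    PySem.Int.mod_natCast j p.length
  simp only [hmod, PySem.List.pyGetD_natCast]

-- the three fixed helper evaluations of A's literal loops
theorem build3 {α β : Type} (f : α → β) (dflt : α) (a b c : α) :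
    (([0, 1, 2] : List Int).foldl
      (fun acc idx => acc ++ [f (PySem.List.pyGetD ([a, b, c] : List α) idx dflt)]) [])
    = [f a, f b, f c] := by
  simp only [List.foldl_cons, List.foldl_nil, List.nil_append]
  norm_num [PySem.List.pyGetD_ofNat']

theorem countloop (c1 c2 c3 m : Int) :
    (([0, 1, 2] : List Int).foldl
      (fun acc idx => if PySem.List.pyGetD ([c1, c2, c3] : List Int) idx 0 = m then acc ++ [idx + 1] else acc) [])
    = ((if c1 = m then [1] else []) ++ (if c2 = m then [2] else []) ++ (if c3 = m then [(3 : Int)] else [])) := by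
  simp only [List.foldl_cons, List.foldl_nil, List.nil_append]
  norm_num [PySem.List.pyGetD_ofNat']
  split_ifs <;> simp

theorem max3 (c1 c2 c3 : Int) :
    (PySem.List.max? ([c1, c2, c3] : List Int) (fun x => x)).getD 0 = max c1 (max c2 c3) := by
  rw [PySem.List.max?_id_cons]
  simp [List.foldl]

theorem beqInt (a b : Int) : (a == b) = decide (a = b) := rfl

theorem finalAB (c1 c2 c3 m : Int) :
    PySem.List.sorted
      ((if c1 = m then [1] else []) ++ (if c2 = m then [2] else [])
        ++ (if c3 = m then [(3 : Int)] else []))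
      (fun x => x) false
    = (([(1, c1), (2, c2), (3, c3)] : List (Int × Int)).filter
        (fun nc => nc.2 == m)).map (fun nc => nc.1) := by
  by_cases h1 : c1 = m <;> by_cases h2 : c2 = m <;> by_cases h3 : c3 = m <;>
    simp [beqInt, h1, h2, h3, List.filter] <;> decide

theorem alt_eq (answers : List Int) :
    solution_alt answers =
      (([(1, patScore [1, 2, 3, 4, 5] answers), (2, patScore [2, 1, 2, 3, 2, 4, 2, 5] answers),
         (3, patScore [3, 3, 1, 1, 2, 2, 4, 4, 5, 5] answers)] : List (Int × Int)).filter
        (fun nc => nc.2 == max (patScore [1, 2, 3, 4, 5] answers)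
          (max (patScore [2, 1, 2, 3, 2, 4, 2, 5] answers)
               (patScore [3, 3, 1, 1, 2, 2, 4, 4, 5, 5] answers)))).map (fun nc => nc.1) := by
  unfold solution_alt
  simp only []
  rw [PySem.List.foldl_prod_mk
      (f := fun (a : Int) (ia : Int × Int) =>
        a + (if ia.2 = PySem.List.pyGetD [1, 2, 3, 4, 5] (PySem.Int.mod ia.1 5) 0 then 1 else 0))
      (g := fun (b : Int × Int) (ia : Int × Int) =>
        (b.1 + (if ia.2 = PySem.List.pyGetD [2, 1, 2, 3, 2, 4, 2, 5] (PySem.Int.mod ia.1 8) 0 then 1 else 0),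
         b.2 + (if ia.2 = PySem.List.pyGetD [3, 3, 1, 1, 2, 2, 4, 4, 5, 5] (PySem.Int.mod ia.1 10) 0 then 1 else 0)))]
  rw [PySem.List.foldl_prod_mk
      (f := fun (a : Int) (ia : Int × Int) =>
        a + (if ia.2 = PySem.List.pyGetD [2, 1, 2, 3, 2, 4, 2, 5] (PySem.Int.mod ia.1 8) 0 then 1 else 0))
      (g := fun (a : Int) (ia : Int × Int) =>
        a + (if ia.2 = PySem.List.pyGetD [3, 3, 1, 1, 2, 2, 4, 4, 5, 5] (PySem.Int.mod ia.1 10) 0 then 1 else 0))]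
  rw [PySem.List.foldl_add, PySem.List.foldl_add, PySem.List.foldl_add]
  rw [countB answers [1, 2, 3, 4, 5] 5 (by norm_num)]
  rw [countB answers [2, 1, 2, 3, 2, 4, 2, 5] 8 (by norm_num)]
  rw [countB answers [3, 3, 1, 1, 2, 2, 4, 4, 5, 5] 10 (by norm_num)]
  simp

theorem sol_eq (answers : List Int) :
    solution answers =
      PySem.List.sorted
        ((if patScore [1, 2, 3, 4, 5] answers = max (patScore [1, 2, 3, 4, 5] answers)
            (max (patScore [2, 1, 2, 3, 2, 4, 2, 5] answers)
                 (patScore [3, 3, 1, 1, 2, 2, 4, 4, 5, 5] answers)) then [1] else [])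
          ++ (if patScore [2, 1, 2, 3, 2, 4, 2, 5] answers = max (patScore [1, 2, 3, 4, 5] answers)
            (max (patScore [2, 1, 2, 3, 2, 4, 2, 5] answers)
                 (patScore [3, 3, 1, 1, 2, 2, 4, 4, 5, 5] answers)) then [2] else [])
          ++ (if patScore [3, 3, 1, 1, 2, 2, 4, 4, 5, 5] answers = max (patScore [1, 2, 3, 4, 5] answers)
            (max (patScore [2, 1, 2, 3, 2, 4, 2, 5] answers)
                 (patScore [3, 3, 1, 1, 2, 2, 4, 4, 5, 5] answers)) then [(3 : Int)] else []))
        (fun x => x) false := by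
  unfold solution
  simp only []
  have hr3 : PySem.List.pyRange 0 (3 : Int) 1 = [0, 1, 2] := by decide
  rw [len3_cast, hr3, build3 (create_answer answers) []]
  rw [len3_cast, hr3, build3 (check_answer answers) []]
  rw [count_pattern _ answers (by norm_num), count_pattern _ answers (by norm_num),
    count_pattern _ answers (by norm_num)]
  rw [len3_cast, hr3, max3, countloop]

-- ===== VERDICT (by name: the statement is the Claim_ definition above) =====
theorem solution_spec : Claim_equal_solution := by
  intro answers _
  unfold Spec_solution
  rw [alt_eq, sol_eq, finalAB]
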